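-- pv_equiv track=rewrite | github.com/otrebor4/PyGameEngine | GameEngine/game/util/PerlinNoise.py | expand
-- ===== SOURCE A (Python) =====
-- def expand(m_map,width,height, exp):
--     m_map1 = []
--     for x in range(0,width):
--         for y in range(0,height):
--             f = m_map[x][y]
--             for i in range(0,exp):
--                 cx = x*exp+i
-- #                cy = x*exp+i
--                 if cx >= len(m_map1):
--                     m_map1.append([])
--                 for i in range(0,exp):
--                     m_map1[cx].append(f)
--     return m_map1
-- ===== SOURCE B (Python) =====
-- def expand(m_map, width, height, exp):
--     m_map1 = []
--     for x in range(width):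
--         base = []
--         for y in range(height):
--             base += [m_map[x][y]] * exp
--         if base:
--             for _ in range(exp):
--                 m_map1.append(base[:])
--     return m_map1
-- ===== Notes on version B (the rewrite author's own statement) =====
-- stated objective: simpler
-- what changed: B builds the fully-expanded row for each input row once and appends exp copies of it, replacing A's triple-nested index arithmetic (cx = x*exp+i with conditional row creation and per-cell inner append loop) with a flat build-then-replicate pass.
import Mathlib
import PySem

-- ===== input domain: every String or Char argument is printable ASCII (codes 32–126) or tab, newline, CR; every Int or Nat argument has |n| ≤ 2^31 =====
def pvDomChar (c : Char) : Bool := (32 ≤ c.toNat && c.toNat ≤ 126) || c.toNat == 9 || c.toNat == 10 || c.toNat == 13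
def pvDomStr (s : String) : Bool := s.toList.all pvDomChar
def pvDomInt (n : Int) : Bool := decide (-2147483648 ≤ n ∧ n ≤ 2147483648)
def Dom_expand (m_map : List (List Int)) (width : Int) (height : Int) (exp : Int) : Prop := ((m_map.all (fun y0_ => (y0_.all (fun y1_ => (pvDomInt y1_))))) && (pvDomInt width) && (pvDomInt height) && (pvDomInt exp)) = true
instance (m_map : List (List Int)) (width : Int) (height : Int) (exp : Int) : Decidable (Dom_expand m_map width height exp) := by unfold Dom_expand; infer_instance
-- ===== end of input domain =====

-- B replaces A's triple-nested index arithmetic by building each expanded row once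
-- and appending exp copies of it (simpler decomposition, same return value).

-- ===== PORT A =====
-- inner 'for i in range(0,exp): m_map1[cx].append(f)' loop
def expandAppendLoop (f : Int) (exp : Int) (cx : Nat) (m1 : List (List Int)) : List (List Int) :=
  (PySem.List.pyRange 0 exp).foldl (fun m1 _ => m1.modify cx (fun row => row ++ [f])) m1

-- body of 'for i in range(0,exp):' (row creation + cell appends)
def expandStepI (x exp f : Int) (m1 : List (List Int)) (i : Int) : List (List Int) :=
  let cx := x * exp + i
  let m1 := if (m1.length : Int) ≤ cx then m1 ++ [([] : List Int)] else m1
  expandAppendLoop f exp cx.toNat m1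

-- body of 'for y in range(0,height):'
def expandStepY (m_map : List (List Int)) (exp : Int) (x : Int) (m1 : List (List Int)) (y : Int) : List (List Int) :=
  let f := PySem.List.pyGetD (PySem.List.pyGetD m_map x []) y 0
  (PySem.List.pyRange 0 exp).foldl (expandStepI x exp f) m1

def expand (m_map : List (List Int)) (width : Int) (height : Int) (exp : Int) : List (List Int) :=
  (PySem.List.pyRange 0 width).foldl
    (fun m1 x => (PySem.List.pyRange 0 height).foldl (expandStepY m_map exp x) m1) []

-- ===== PORT B =====
-- 'base = []; for y in range(height): base += [m_map[x][y]] * exp'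
def baseRow (m_map : List (List Int)) (height exp : Int) (x : Int) : List Int :=
  (PySem.List.pyRange 0 height).foldl
    (fun base y => base ++ List.replicate exp.toNat (PySem.List.pyGetD (PySem.List.pyGetD m_map x []) y 0)) []

def expand_alt (m_map : List (List Int)) (width : Int) (height : Int) (exp : Int) : List (List Int) :=
  (PySem.List.pyRange 0 width).foldl
    (fun m1 x =>
      let base := baseRow m_map height exp x
      if base ≠ [] then (PySem.List.pyRange 0 exp).foldl (fun m1 _ => m1 ++ [base]) m1
      else m1) []

-- ===== PRECONDITION & SPEC =====
-- Pre_ excludes exactly the inputs where Python A raises IndexError (m_map[x][y]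
-- accessed for x < width, y < height when height > 0); B raises there too.
def Pre_expand (m_map : List (List Int)) (width : Int) (height : Int) (exp : Int) : Prop :=
  0 < height → (width ≤ (m_map.length : Int) ∧ ∀ row ∈ m_map.take width.toNat, height ≤ (row.length : Int))
instance (m_map : List (List Int)) (width : Int) (height : Int) (exp : Int) : Decidable (Pre_expand m_map width height exp) := by unfold Pre_expand; infer_instance

def pvWitness_expand : List (List Int) × Int × Int × Int := ([[1, 2], [3, 4]], 2, 2, 2)

def Spec_expand (m_map : List (List Int)) (width : Int) (height : Int) (exp : Int) (out : List (List Int)) : Prop := out = expand_alt m_map width height exp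
instance (m_map : List (List Int)) (width : Int) (height : Int) (exp : Int) (out : List (List Int)) : Decidable (Spec_expand m_map width height exp out) := by unfold Spec_expand; infer_instance

-- ===== CLAIM (what is proved, stated in full; the proofs are below) =====
def Claim_equal_expand : Prop := ∀ (m_map : List (List Int)) (width : Int) (height : Int) (exp : Int), Dom_expand m_map width height exp → Pre_expand m_map width height exp → Spec_expand m_map width height exp (expand m_map width height exp)

-- ===== LEMMAS AND PROOFS =====

-- the element value used for cell (x, y)
def cellF (m_map : List (List Int)) (x y : Int) : Int :=
  PySem.List.pyGetD (PySem.List.pyGetD m_map x []) y 0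

-- folding a step that ignores its arguments and the element: appending a fixed row n times
theorem foldl_append_const {β : Type} (b : List Int) :
    ∀ (l : List β) (acc : List (List Int)),
      l.foldl (fun acc _ => acc ++ [b]) acc = acc ++ List.replicate l.length b := by
  intro l
  induction l with
  | nil => intro acc; simp
  | cons a l ih =>
    intro acc
    rw [List.foldl_cons, ih]
    simp [List.replicate_succ]

theorem modify_id' (l : List (List Int)) (k : Nat) :
    l.modify k (fun row => row) = l := by
  induction l generalizing k with
  | nil => simp
  | cons a l ih =>
    cases k with
    | zero => simp
    | succ k => simp [ih]

theorem modify_append_nil (l : List (List Int)) (k : Nat) :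
    l.modify k (fun row => row ++ ([] : List Int)) = l := by
  have h : (fun row : List Int => row ++ ([] : List Int)) = fun row => row := by
    funext row; simp
  rw [h, modify_id']

theorem foldl_modify_const {β : Type} (f : Int) (k : Nat) :
    ∀ (l : List β) (acc : List (List Int)),
      l.foldl (fun acc _ => acc.modify k (fun row => row ++ [f])) acc
        = acc.modify k (fun row => row ++ List.replicate l.length f) := by
  intro l
  induction l with
  | nil =>
    intro acc
    simp only [List.foldl_nil, List.length_nil, List.replicate_zero]
    exact (modify_append_nil acc k).symm
  | cons a l ih =>
    intro acc
    rw [List.foldl_cons, ih, List.modify_modify_eq]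
    congr 1
    funext row
    simp [List.replicate_succ]

theorem expandAppendLoop_eq (f : Int) (exp : Int) (cx : Nat) (m1 : List (List Int)) :
    expandAppendLoop f exp cx m1 = m1.modify cx (fun row => row ++ List.replicate exp.toNat f) := by
  unfold expandAppendLoop
  rw [foldl_modify_const]
  congr 1
  simp [PySem.List.length_pyRange_one]

theorem modify_append_right (pre : List (List Int)) (k : Nat) (g : List Int → List Int) :
    ∀ (mid : List (List Int)), (pre ++ mid).modify (pre.length + k) g = pre ++ mid.modify k g := by
  induction pre with
  | nil => intro mid; simp
  | cons a pre ih =>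
    intro mid
    simp only [List.cons_append, List.length_cons]
    have : pre.length + 1 + k = (pre.length + k) + 1 := by omega
    rw [this]
    simp [ih]

-- the i-loop at y = 0: rows are created one by one, each filled with exp copies of f
theorem createLoop (x exp f : Int) (hx : 0 ≤ x) :
    ∀ (n : Nat) (j : Int), 0 ≤ j → j + n = exp →
      ∀ (acc : List (List Int)), (acc.length : Int) = x * exp + j →
        (PySem.List.pyRange j exp).foldl (expandStepI x exp f) acc
          = acc ++ List.replicate n (List.replicate exp.toNat f) := by
  intro n
  induction n with
  | zero =>
    intro j hj hje acc hlen
    rw [PySem.List.pyRange_one_eq_nil (by omega)]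
    simp
  | succ n ih =>
    intro j hj hje acc hlen
    have hjlt : j < exp := by omega
    rw [PySem.List.pyRange_one_cons hjlt, List.foldl_cons]
    have hxe : (0 : Int) ≤ x * exp := mul_nonneg hx (by omega)
    have hcx : (0 : Int) ≤ x * exp + j := by omega
    have hstep : expandStepI x exp f acc j = acc ++ [List.replicate exp.toNat f] := by
      unfold expandStepI
      simp only [hlen, le_refl, if_pos]
      rw [expandAppendLoop_eq]
      have htn : (x * exp + j).toNat = acc.length + 0 := by omega
      rw [htn, modify_append_right]
      simp
    have hlen' : (((acc ++ [List.replicate exp.toNat f]).length : Nat) : Int) = x * exp + (j + 1) := by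
      simp only [List.length_append, List.length_cons, List.length_nil]
      push_cast
      linarith [hlen]
    rw [hstep, ih (j + 1) (by omega) (by push_cast at hje ⊢; linarith [hje]) _ hlen']
    simp [List.replicate_succ]
-- the i-loop at y ≥ 1: each of the exp existing rows gets exp copies of f appended
theorem updateLoop (x exp f : Int) (hx : 0 ≤ x) :
    ∀ (n : Nat) (j : Int), 0 ≤ j → j + n = exp →
      ∀ (acc rows : List (List Int)), (acc.length : Int) = x * exp + j → rows.length = n →
        (PySem.List.pyRange j exp).foldl (expandStepI x exp f) (acc ++ rows)
          = acc ++ rows.map (fun row => row ++ List.replicate exp.toNat f) := by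
  intro n
  induction n with
  | zero =>
    intro j hj hje acc rows hlen hrows
    rw [PySem.List.pyRange_one_eq_nil (by omega)]
    simp [List.length_eq_zero_iff.mp hrows]
  | succ n ih =>
    intro j hj hje acc rows hlen hrows
    have hjlt : j < exp := by omega
    obtain ⟨r, rest, rfl⟩ : ∃ r rest, rows = r :: rest := by
      cases rows with
      | nil => simp at hrows
      | cons r rest => exact ⟨r, rest, rfl⟩
    rw [PySem.List.pyRange_one_cons hjlt, List.foldl_cons]
    have hxe : (0 : Int) ≤ x * exp := mul_nonneg hx (by omega)
    have hcx : (0 : Int) ≤ x * exp + j := by omega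
    have hstep : expandStepI x exp f (acc ++ r :: rest) j
        = (acc ++ [r ++ List.replicate exp.toNat f]) ++ rest := by
      unfold expandStepI
      have hlt : ¬ ((((acc ++ r :: rest).length : Nat) : Int) ≤ x * exp + j) := by
        simp only [List.length_append, List.length_cons]
        push_cast
        linarith [hlen, Int.natCast_nonneg rest.length]
      simp only [hlt, if_neg, not_false_iff]
      rw [expandAppendLoop_eq]
      have htn : (x * exp + j).toNat = acc.length + 0 := by omega
      rw [htn, modify_append_right]
      simp
    have hlen' : (((acc ++ [r ++ List.replicate exp.toNat f]).length : Nat) : Int) = x * exp + (j + 1) := by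
      simp only [List.length_append, List.length_cons, List.length_nil]
      push_cast
      linarith [hlen]
    rw [hstep, ih (j + 1) (by omega) (by push_cast at hje ⊢; linarith [hje]) _ rest
        hlen' (by simpa using hrows)]
    simp

-- the y-loop from y₀ ≥ 1 on: every row gets the remaining expanded cells appended
theorem yLoop (m_map : List (List Int)) (height exp x : Int) (hx : 0 ≤ x) (he : 0 < exp) :
    ∀ (m : Nat) (y0 : Int), 0 ≤ y0 → y0 + m = height →
      ∀ (acc rows : List (List Int)), (acc.length : Int) = x * exp → rows.length = exp.toNat →
        (PySem.List.pyRange y0 height).foldl (expandStepY m_map exp x) (acc ++ rows)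
          = acc ++ rows.map (fun row =>
              row ++ (PySem.List.pyRange y0 height).flatMap
                (fun y => List.replicate exp.toNat (cellF m_map x y))) := by
  intro m
  induction m with
  | zero =>
    intro y0 hy0 hym acc rows hlen hrows
    rw [PySem.List.pyRange_one_eq_nil (by omega)]
    simp
  | succ m ih =>
    intro y0 hy0 hym acc rows hlen hrows
    have hylt : y0 < height := by omega
    rw [PySem.List.pyRange_one_cons hylt, List.foldl_cons]
    have hstep : expandStepY m_map exp x (acc ++ rows) y0
        = acc ++ rows.map (fun row => row ++ List.replicate exp.toNat (cellF m_map x y0)) := by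
      unfold expandStepY
      exact updateLoop x exp _ hx exp.toNat 0 le_rfl (by omega) acc rows
        (by simpa using hlen) hrows
    rw [hstep, ih (y0 + 1) (by omega) (by push_cast at hym ⊢; linarith [hym]) acc _ hlen
        (by simpa using hrows)]
    rw [List.map_map, List.flatMap_cons]
    simp [Function.comp_def]

-- one full x-iteration of A when height > 0 and exp > 0
theorem xStep (m_map : List (List Int)) (height exp x : Int) (hx : 0 ≤ x)
    (hh : 0 < height) (he : 0 < exp) (acc : List (List Int))
    (hlen : (acc.length : Int) = x * exp) :
    (PySem.List.pyRange 0 height).foldl (expandStepY m_map exp x) acc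
      = acc ++ List.replicate exp.toNat (baseRow m_map height exp x) := by
  rw [PySem.List.pyRange_one_cons hh, List.foldl_cons]
  have hstep : expandStepY m_map exp x acc 0
      = acc ++ List.replicate exp.toNat (List.replicate exp.toNat (cellF m_map x 0)) := by
    unfold expandStepY
    exact createLoop x exp _ hx exp.toNat 0 le_rfl (by omega) acc (by simpa using hlen)
  simp only [zero_add]
  rw [hstep, yLoop m_map height exp x hx he (height - 1).toNat 1 (by omega) (by omega) acc _
      hlen (by simp)]
  rw [List.map_replicate]
  congr 2
  have hbase : baseRow m_map height exp x
      = (PySem.List.pyRange 0 height).flatMap (fun y => List.replicate exp.toNat (cellF m_map x y)) := by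
    unfold baseRow cellF
    exact PySem.List.foldl_append_eq_flatMap _ _ []
  rw [hbase, PySem.List.pyRange_one_cons hh, List.flatMap_cons]
  simp only [zero_add]

-- the x-loop of A when height > 0 and exp > 0
theorem xLoop (m_map : List (List Int)) (width height exp : Int)
    (hh : 0 < height) (he : 0 < exp) :
    ∀ (n : Nat) (x0 : Int), 0 ≤ x0 → x0 + n = width →
      ∀ (acc : List (List Int)), (acc.length : Int) = x0 * exp →
        (PySem.List.pyRange x0 width).foldl
          (fun m1 x => (PySem.List.pyRange 0 height).foldl (expandStepY m_map exp x) m1) acc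
          = acc ++ (PySem.List.pyRange x0 width).flatMap
              (fun x => List.replicate exp.toNat (baseRow m_map height exp x)) := by
  intro n
  induction n with
  | zero =>
    intro x0 hx0 hxn acc hlen
    rw [PySem.List.pyRange_one_eq_nil (a := x0) (b := width) (by omega)]
    simp
  | succ n ih =>
    intro x0 hx0 hxn acc hlen
    have hxlt : x0 < width := by omega
    have hlen' : (((acc ++ List.replicate exp.toNat (baseRow m_map height exp x0)).length : Nat) : Int)
        = (x0 + 1) * exp := by
      simp only [List.length_append, List.length_replicate]
      push_cast [Int.toNat_of_nonneg he.le]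
      nlinarith [hlen]
    rw [PySem.List.pyRange_one_cons hxlt, List.foldl_cons,
        xStep m_map height exp x0 hx0 hh he acc hlen,
        ih (x0 + 1) (by omega) (by push_cast at hxn ⊢; linarith [hxn]) _ hlen']
    rw [List.flatMap_cons]
    simp

-- the base row is nonempty when height > 0 and exp > 0
theorem baseRow_ne (m_map : List (List Int)) (height exp x : Int)
    (hh : 0 < height) (he : 0 < exp) : baseRow m_map height exp x ≠ [] := by
  have hbase : baseRow m_map height exp x
      = (PySem.List.pyRange 0 height).flatMap (fun y => List.replicate exp.toNat (cellF m_map x y)) := by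
    unfold baseRow cellF
    exact PySem.List.foldl_append_eq_flatMap _ _ []
  rw [hbase, PySem.List.pyRange_one_cons hh, List.flatMap_cons]
  simp only [zero_add]
  obtain ⟨k, hk⟩ : ∃ k, exp.toNat = k + 1 := ⟨exp.toNat - 1, by omega⟩
  simp [hk, List.replicate_succ]

-- B's x-loop when height > 0 and exp > 0
theorem bLoop (m_map : List (List Int)) (height exp : Int) (hh : 0 < height) (he : 0 < exp) :
    ∀ (l : List Int) (acc : List (List Int)),
      l.foldl (fun m1 x =>
          let base := baseRow m_map height exp x
          if base ≠ [] then (PySem.List.pyRange 0 exp).foldl (fun m1 _ => m1 ++ [base]) m1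
          else m1) acc
        = acc ++ l.flatMap (fun x => List.replicate exp.toNat (baseRow m_map height exp x)) := by
  intro l
  induction l with
  | nil => intro acc; simp
  | cons a l ih =>
    intro acc
    rw [List.foldl_cons]
    simp only [baseRow_ne m_map height exp a hh he, ne_eq, not_false_iff, if_pos]
    rw [foldl_append_const, ih, List.flatMap_cons]
    simp [PySem.List.length_pyRange_one]

-- degenerate inputs: a fold whose step is pointwise the identity
theorem foldl_of_id {α β : Type} (g : α → β → α)
    (hg : ∀ acc y, g acc y = acc) :
    ∀ (l : List β) (acc : α), l.foldl g acc = acc := by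
  intro l
  induction l with
  | nil => intro acc; simp
  | cons a l ih => intro acc; rw [List.foldl_cons, hg]; exact ih acc

theorem baseRow_nil (m_map : List (List Int)) (height exp x : Int)
    (h : height ≤ 0 ∨ exp ≤ 0) : baseRow m_map height exp x = [] := by
  rcases h with h | h
  · unfold baseRow
    rw [PySem.List.pyRange_one_eq_nil (by omega)]
    simp
  · unfold baseRow
    have : exp.toNat = 0 := by omega
    rw [this]
    refine foldl_of_id _ ?_ _ []
    intro acc y
    simp

theorem expand_degenerate (m_map : List (List Int)) (width height exp : Int)
    (h : height ≤ 0 ∨ exp ≤ 0) :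
    expand m_map width height exp = [] ∧ expand_alt m_map width height exp = [] := by
  constructor
  · unfold expand
    apply foldl_of_id
    intro acc x
    rcases h with h | h
    · rw [PySem.List.pyRange_one_eq_nil (by omega)]; simp
    · apply foldl_of_id
      intro acc y
      unfold expandStepY
      rw [PySem.List.pyRange_one_eq_nil (by omega)]
      simp
  · unfold expand_alt
    apply foldl_of_id
    intro acc x
    simp [baseRow_nil m_map height exp x h]

theorem expand_width_neg (m_map : List (List Int)) (width height exp : Int)
    (h : width ≤ 0) :
    expand m_map width height exp = [] ∧ expand_alt m_map width height exp = [] := by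
  unfold expand expand_alt
  rw [PySem.List.pyRange_one_eq_nil (a := 0) (b := width) (by omega)]
  simp

-- ===== VERDICT (by name: the statement is the Claim_ definition above) =====
theorem expand_spec : Claim_equal_expand := by
  intro m_map width height exp _ _
  unfold Spec_expand
  by_cases hh : 0 < height
  · by_cases he : 0 < exp
    · by_cases hw : 0 < width
      · unfold expand expand_alt
        rw [xLoop m_map width height exp hh he width.toNat 0 le_rfl (by omega) [] (by simp),
            bLoop m_map height exp hh he]
      · have h := expand_width_neg m_map width height exp (by omega)
        rw [h.1, h.2]
    · have h := expand_degenerate m_map width height exp (Or.inr (by omega))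
      rw [h.1, h.2]
  · have h := expand_degenerate m_map width height exp (Or.inl (by omega))
    rw [h.1, h.2]
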